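-- pv_equiv track=rewrite | github.com/Monguku/CS-171 | HW7_15-2.py | fractal
-- ===== SOURCE A (Python) =====
-- def fractal(length, spaces):
--     out = ''
--     if length == 1:
--         for x in range(spaces):
--             out += (' ')
--         out += ('*')
--
--     else:
--         out += (fractal(length//2, spaces))
--         out += ('\n')
--         for x in range(spaces):
--             out += (' ')
--         for y in range(length):
--             out += ('*')
--         out += ('\n')
--         out += (fractal(length//2, spaces + (length//2)))
--
--     return out
-- ===== SOURCE B (Python) =====
-- def fractal(length, spaces):
--     # Iterative: explicit work stack + list of pieces joined at the end,
--     # instead of the original's recursion with incremental string +=.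
--     pieces = []
--     stack = [(length, spaces)]
--     while stack:
--         item = stack.pop()
--         if isinstance(item, str):
--             pieces.append(item)
--         else:
--             l, s = item
--             if l == 1:
--                 pieces.append(' ' * s + '*')
--             else:
--                 stack.append((l // 2, s + l // 2))
--                 stack.append('\n' + ' ' * s + '*' * l + '\n')
--                 stack.append((l // 2, s))
--     return ''.join(pieces)
-- ===== Notes on version B (the rewrite author's own statement) =====
-- stated objective: faster
-- what changed: Replaces the recursion with an explicit work stack of (node|literal) items driven by a loop, collecting output pieces in a list joined once at the end instead of building the string by repeated += concatenation.
import Mathlib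
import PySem

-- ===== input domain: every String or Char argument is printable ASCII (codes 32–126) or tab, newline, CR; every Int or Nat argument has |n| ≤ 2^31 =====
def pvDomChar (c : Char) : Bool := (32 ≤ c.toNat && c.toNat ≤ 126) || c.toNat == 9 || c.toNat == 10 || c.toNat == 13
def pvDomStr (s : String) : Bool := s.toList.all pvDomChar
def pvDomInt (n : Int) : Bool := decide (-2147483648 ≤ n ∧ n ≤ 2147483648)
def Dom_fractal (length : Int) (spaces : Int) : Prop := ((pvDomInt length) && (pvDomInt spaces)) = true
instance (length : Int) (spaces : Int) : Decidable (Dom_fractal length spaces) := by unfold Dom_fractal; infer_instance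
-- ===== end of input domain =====

-- B replaces the recursion with an explicit work-stack loop collecting pieces joined once at the end, avoiding repeated += string concatenation (measured faster in a timing run).


-- ===== PORT A =====
-- Literal port of A over List Char (Python strings are ported on the List Char side per PySem convention).
-- For length ≤ 0 Python A recurses forever (RecursionError): the guard only makes the Lean function total; excluded by Pre_.
def fractalChars (length : Int) (spaces : Int) : List Char :=
  if length == 1 then
    let out : List Char := []
    let out := (PySem.List.pyRange 0 spaces 1).foldl (fun o _ => o ++ [' ']) out
    out ++ ['*']
  else if length ≤ 0 then []
  else
    let out : List Char := []
    let out := out ++ fractalChars (PySem.Int.floordiv length 2) spaces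
    let out := out ++ ['\n']
    let out := (PySem.List.pyRange 0 spaces 1).foldl (fun o _ => o ++ [' ']) out
    let out := (PySem.List.pyRange 0 length 1).foldl (fun o _ => o ++ ['*']) out
    let out := out ++ ['\n']
    out ++ fractalChars (PySem.Int.floordiv length 2) (spaces + PySem.Int.floordiv length 2)
termination_by length.toNat
decreasing_by
  all_goals
    rw [PySem.Int.floordiv_eq_ediv_of_pos (by omega : (0:Int) < 2)]
    simp only [beq_iff_eq] at *
    omega

def fractal (length : Int) (spaces : Int) : String :=
  String.ofList (fractalChars length spaces)

-- ===== PORT B =====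
-- Work item of B's explicit stack: a node still to expand, or a literal piece to emit.
inductive WItem where
  | node (l s : Int)
  | lit (cs : List Char)

-- Termination measure for the stack loop (proof device only; B's Python loop has no counterpart).
def wWeight : WItem → Nat
  | .lit _ => 1
  | .node l _ => if l ≤ 1 then 1 else l.toNat * l.toNat

-- The while loop of B: pop an item; literals are appended to pieces, a node is either emitted
-- (l == 1) or replaced by its three sub-items in order. For l ≤ 0 Python B loops forever: the
-- skip guard only makes the Lean function total; excluded by Pre_.
def fractalLoop (stack : List WItem) (pieces : List (List Char)) : List (List Char) :=
  match stack with
  | [] => pieces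
  | .lit cs :: rest => fractalLoop rest (pieces ++ [cs])
  | .node l s :: rest =>
    if l == 1 then
      fractalLoop rest (pieces ++ [PySem.List.pyRepeat [' '] s ++ ['*']])
    else if l ≤ 0 then
      fractalLoop rest pieces
    else
      fractalLoop (.node (PySem.Int.floordiv l 2) s
        :: .lit ('\n' :: (PySem.List.pyRepeat [' '] s ++ PySem.List.pyRepeat ['*'] l ++ ['\n']))
        :: .node (PySem.Int.floordiv l 2) (s + PySem.Int.floordiv l 2)
        :: rest) pieces
termination_by (stack.map wWeight).sum
decreasing_by
  · simp [wWeight]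
  · simp only [List.map_cons, List.sum_cons, wWeight]
    rename_i h1
    simp only [beq_iff_eq] at h1
    rw [if_pos (by omega : l ≤ 1)]
    omega
  · rename_i h1 h0
    simp only [List.map_cons, List.sum_cons, wWeight]
    rw [if_pos (by omega : l ≤ 1)]
    omega
  · rename_i h1 h0
    simp only [List.map_cons, List.sum_cons, wWeight]
    simp only [beq_iff_eq] at h1
    rw [PySem.Int.floordiv_eq_ediv_of_pos (by omega : (0:Int) < 2)]
    have h2 : (2:Int) ≤ l := by omega
    have hd : (l / 2).toNat = l.toNat / 2 := by omega
    rw [if_neg (by omega : ¬ l ≤ 1)]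
    have hm : 2 ≤ l.toNat := by omega
    split
    · have h4 : 2 * 2 ≤ l.toNat * l.toNat := Nat.mul_le_mul hm hm
      omega
    · rename_i hgt
      have hk : 2 ≤ (l / 2).toNat := by omega
      have h2k : 2 * (l / 2).toNat ≤ l.toNat := by omega
      have hsq : (2 * (l / 2).toNat) * (2 * (l / 2).toNat) ≤ l.toNat * l.toNat :=
        Nat.mul_le_mul h2k h2k
      have hkk : 2 * 2 ≤ (l / 2).toNat * (l / 2).toNat := Nat.mul_le_mul hk hk
      nlinarith [hsq, hkk]

def fractal_alt (length : Int) (spaces : Int) : String :=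
  String.ofList (PySem.Chars.join [] (fractalLoop [.node length spaces] []))

-- ===== PRECONDITION & SPEC =====
-- Pre_ excludes length ≤ 0, where Python A raises RecursionError (and B's loop does not terminate).
def Pre_fractal (length : Int) (spaces : Int) : Prop := 1 ≤ length
instance (length : Int) (spaces : Int) : Decidable (Pre_fractal length spaces) := by unfold Pre_fractal; infer_instance
def pvWitness_fractal : Int × Int := (4, 2)

def Spec_fractal (length : Int) (spaces : Int) (out : String) : Prop := out = fractal_alt length spaces
instance (length : Int) (spaces : Int) (out : String) : Decidable (Spec_fractal length spaces out) := by unfold Spec_fractal; infer_instance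

-- ===== CLAIM (what is proved, stated in full; the proofs are below) =====
def Claim_equal_fractal : Prop := ∀ (length : Int) (spaces : Int), Dom_fractal length spaces → Pre_fractal length spaces → Spec_fractal length spaces (fractal length spaces)

-- ===== LEMMAS AND PROOFS =====

-- ''.join with empty separator is flatten (PySem.Chars.join is intercalate; no library lemma for sep = []).
theorem join_nil_flatten (ps : List (List Char)) : PySem.Chars.join [] ps = ps.flatten := by
  induction ps with
  | nil => rfl
  | cons h t ih =>
    cases t with
    | nil => simp [PySem.Chars.join, List.intercalate]
    | cons h2 t2 =>
      simp only [PySem.Chars.join, List.intercalate, List.intersperse] at *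
      simp_all

-- Meaning of a work item: what the finished output contributes for it.
def wSem : WItem → List Char
  | .lit cs => cs
  | .node l s => fractalChars l s

-- Invariant of B's loop: the joined result is the pieces so far followed by the meanings of the stack, in order.
theorem fractalLoop_sem (stack : List WItem) (pieces : List (List Char)) :
    (fractalLoop stack pieces).flatten = pieces.flatten ++ (stack.map wSem).flatten := by
  fun_induction fractalLoop stack pieces with
  | case1 pieces => simp
  | case2 pieces cs rest ih => simp [ih, wSem]
  | case3 pieces l s rest h1 ih =>
    have hl : l = 1 := by simpa using h1
    subst hl
    simp only [PySem.List.pyRepeat_singleton] at ih ⊢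
    rw [ih]
    simp [wSem, fractalChars]
  | case4 pieces l s rest h1 h0 ih =>
    have hsem : wSem (.node l s) = [] := by
      simp only [wSem]; rw [fractalChars]; simp [h1, h0]
    simp [ih, hsem]
  | case5 pieces l s rest h1 h0 ih =>
    simp only [List.map_cons, List.flatten_cons, wSem] at ih ⊢
    rw [ih]
    have hexp : fractalChars l s
        = fractalChars (PySem.Int.floordiv l 2) s
          ++ ('\n' :: (PySem.List.pyRepeat [' '] s ++ PySem.List.pyRepeat ['*'] l ++ ['\n']))
          ++ fractalChars (PySem.Int.floordiv l 2) (s + PySem.Int.floordiv l 2) := by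
      conv_lhs => rw [fractalChars]
      simp [h1, h0]
    rw [hexp]
    simp

-- ===== VERDICT (by name: the statement is the Claim_ definition above) =====
theorem fractal_spec : Claim_equal_fractal := by
  intro length spaces _ _
  unfold Spec_fractal fractal fractal_alt
  rw [join_nil_flatten]
  have h := fractalLoop_sem [.node length spaces] []
  simp [wSem] at h
  rw [h]
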